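-- pv_equiv track=rewrite | github.com/MsterKK/chevauchement_sequences | FM_index.py | count_table
-- ===== SOURCE A (Python) =====
-- def count_table(seq):
-- 	"""Fonction qui renvoie la table des occurences d'une sequence, çad un dictionnaire qui, pour chaque lettre de l'alphabet,
-- 	contient la ligne du tableau des occurences (voir rapport pour le détail)
-- 	-
-- 	output
-- 		dic_table: dictionnaire contenant des listes pour chaque clef
-- 	"""
-- 	dic_table = {}
-- 	alphabet =["$","A","C","G","T"]
-- 	taille_seq = len(seq)
-- 	#initialisation du dictionnaire
-- 	for letter in alphabet:
-- 		dic_table[letter] = [0]*taille_seq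
-- 	#parcours de la chaine de caractères pour trouver les occurences de chaque caractère
-- 	for k in range(taille_seq):
-- 		c = seq[k]
-- 		dic_table[c][k] = 1
-- 	#concatenation des occurences trouvées afin de former le tableau
-- 	for letter in alphabet:
-- 		for k in range(1,taille_seq):
-- 			dic_table[letter][k] += dic_table[letter][k-1]
-- 	return dic_table
-- ===== SOURCE B (Python) =====
-- def count_table(seq):
--     """Single accumulator pass: keep running counts per letter and append the
--     current count of every letter after each character, instead of A's three
--     passes (zero-init, mark-1, prefix-sum)."""
--     alphabet = ["$", "A", "C", "G", "T"]
--     dic_table = {letter: [] for letter in alphabet}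
--     counts = {letter: 0 for letter in alphabet}
--     for c in seq:
--         counts[c] += 1
--         for letter in alphabet:
--             dic_table[letter].append(counts[letter])
--     return dic_table
-- ===== Notes on version B (the rewrite author's own statement) =====
-- stated objective: simpler
-- what changed: A zero-initialises full rows, marks a 1 at each position, then does a separate prefix-sum pass per letter; B makes one pass over seq with a running counter per letter, appending the current counts, so the rows are built cumulatively in a single loop.
import Mathlib
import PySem

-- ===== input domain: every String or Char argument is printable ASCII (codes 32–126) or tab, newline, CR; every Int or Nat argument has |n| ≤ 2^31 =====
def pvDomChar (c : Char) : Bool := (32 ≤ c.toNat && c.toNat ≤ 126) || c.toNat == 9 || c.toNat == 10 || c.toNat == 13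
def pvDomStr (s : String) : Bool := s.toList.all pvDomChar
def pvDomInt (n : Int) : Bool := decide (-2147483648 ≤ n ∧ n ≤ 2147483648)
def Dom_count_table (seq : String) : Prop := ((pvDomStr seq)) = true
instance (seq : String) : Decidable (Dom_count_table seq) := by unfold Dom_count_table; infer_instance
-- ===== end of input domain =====

-- B replaces A's three passes (zero-init rows, mark 1s, per-letter prefix sums) by one pass
-- keeping a running counter per letter and appending the current counts; same values, simpler.


-- ===== PORT A =====
-- alphabet = ["$","A","C","G","T"]
def pvAlpha : List String := ["$", "A", "C", "G", "T"]

-- dict update dic[key] = f(dic[key]) on an association list (keys are the fixed alphabet;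
-- a key not present is a no-op here — in Python that is a KeyError, excluded by Pre_)
def pvUpd {α : Type} (d : List (String × α)) (key : String) (f : α → α) : List (String × α) :=
  d.map (fun p => if p.1 = key then (p.1, f p.2) else p)

def count_table (seq : String) : List (String × List Int) :=
  let cs := seq.toList
  let n := cs.length
  -- for letter in alphabet: dic_table[letter] = [0]*taille_seq
  let d0 := pvAlpha.map (fun letter => (letter, List.replicate n (0 : Int)))
  -- for k in range(taille_seq): c = seq[k]; dic_table[c][k] = 1   (seq[k] always in range here)
  let d1 := (PySem.List.pyRange 0 (n : Int) 1).foldl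
      (fun d k => pvUpd d (String.ofList [PySem.List.pyGetD cs k ' ']) (fun row => PySem.List.pySetD row k 1)) d0
  -- for letter in alphabet: for k in range(1, taille_seq): dic_table[letter][k] += dic_table[letter][k-1]
  pvAlpha.foldl
      (fun d letter => pvUpd d letter (fun row =>
        (PySem.List.pyRange 1 (n : Int) 1).foldl
          (fun r k => PySem.List.pySetD r k (PySem.List.pyGetD r k 0 + PySem.List.pyGetD r (k - 1) 0)) row)) d1

-- ===== PORT B =====
-- counts[letter] lookup (always present here; a missing key is Python's KeyError, excluded by Pre_)
def pvLook (d : List (String × Int)) (key : String) : Int :=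
  ((d.find? (fun p => p.1 = key)).map (·.2)).getD 0

-- loop body: counts[c] += 1; for letter in alphabet: dic_table[letter].append(counts[letter])
def pvStep (st : List (String × List Int) × List (String × Int)) (c : Char) :
    List (String × List Int) × List (String × Int) :=
  let counts := pvUpd st.2 (String.ofList [c]) (· + 1)
  (pvAlpha.foldl (fun t letter => pvUpd t letter (fun row => row ++ [pvLook counts letter])) st.1,
   counts)

def count_table_alt (seq : String) : List (String × List Int) :=
  (seq.toList.foldl pvStep
      (pvAlpha.map (fun l => (l, ([] : List Int))), pvAlpha.map (fun l => (l, (0 : Int))))).1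

-- ===== PRECONDITION & SPEC =====
-- Pre_ excludes exactly the strings containing a character outside {$,A,C,G,T}: there the
-- Python A (and B) raises KeyError.
def Pre_count_table (seq : String) : Prop :=
  seq.toList.all (fun c => ['$', 'A', 'C', 'G', 'T'].contains c) = true
instance (seq : String) : Decidable (Pre_count_table seq) := by unfold Pre_count_table; infer_instance

def pvWitness_count_table : String := "GATTACA$"

def Spec_count_table (seq : String) (out : List (String × List Int)) : Prop := out = count_table_alt seq
instance (seq : String) (out : List (String × List Int)) : Decidable (Spec_count_table seq out) := by
  unfold Spec_count_table; infer_instance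

-- ===== CLAIM (what is proved, stated in full; the proofs are below) =====
def Claim_equal_count_table : Prop :=
  ∀ (seq : String), Dom_count_table seq → Pre_count_table seq → Spec_count_table seq (count_table seq)

-- ===== LEMMAS AND PROOFS =====

-- the running count of letter l, the spec both sides are reduced to
def pvCnt (l : String) (cs : List Char) : Int := (cs.countP (fun c => l = String.ofList [c]) : Int)

-- both ports compute this table
def pvTable (cs : List Char) : List (String × List Int) :=
  pvAlpha.map (fun l => (l, (List.range cs.length).map (fun k => pvCnt l (cs.take (k + 1)))))

lemma pvUpd_map {α : Type} (as : List String) (g : String → α) (key : String) (f : α → α) :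
    pvUpd (as.map (fun l => (l, g l))) key f
      = as.map (fun l => (l, if l = key then f (g l) else g l)) := by
  simp only [pvUpd, List.map_map]
  apply List.map_congr_left
  intro l _
  by_cases h : l = key <;> simp [h]

lemma foldl_pvUpd {α β : Type} (ks : List β) (key : β → String) (f : β → α → α)
    (as : List String) (g : String → α) :
    ks.foldl (fun d k => pvUpd d (key k) (f k)) (as.map (fun l => (l, g l)))
      = as.map (fun l => (l, ks.foldl (fun r k => if l = key k then f k r else r) (g l))) := by
  induction ks generalizing g with
  | nil => rfl
  | cons k ks ih =>
    simp only [List.foldl_cons, pvUpd_map]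
    rw [ih]

lemma foldl_miss {α : Type} (as : List String) (l : String) (hl : l ∉ as)
    (f : String → α → α) (r : α) :
    as.foldl (fun r a => if l = a then f a r else r) r = r := by
  induction as generalizing r with
  | nil => rfl
  | cons a as ih =>
    simp only [List.foldl_cons]
    rw [if_neg (by rintro rfl; exact hl List.mem_cons_self),
      ih (fun h => hl (List.mem_cons_of_mem _ h))]

lemma foldl_hit_once {α : Type} (as : List String) (l : String) (hl : l ∈ as) (hnd : as.Nodup)
    (f : String → α → α) (r : α) :
    as.foldl (fun r a => if l = a then f a r else r) r = f l r := by
  induction as generalizing r with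
  | nil => cases hl
  | cons a as ih =>
    simp only [List.foldl_cons]
    by_cases h : l = a
    · subst h
      rw [if_pos rfl, foldl_miss as l (List.nodup_cons.mp hnd).1]
    · rw [if_neg h]
      exact ih (by rcases List.mem_cons.mp hl with h' | h'; exact absurd h' h; exact h')
        (List.nodup_cons.mp hnd).2 r

lemma pvLook_map (as : List String) (h : String → Int) (key : String) (hk : key ∈ as) :
    pvLook (as.map (fun l => (l, h l))) key = h key := by
  induction as with
  | nil => cases hk
  | cons a as ih =>
    by_cases hak : a = key
    · subst hak; simp [pvLook]
    · have hk' : key ∈ as := by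
        rcases List.mem_cons.mp hk with h' | h'
        · exact absurd h'.symm hak
        · exact h'
      have hstep : pvLook ((a :: as).map (fun l => (l, h l))) key
          = pvLook (as.map (fun l => (l, h l))) key := by
        simp [pvLook, decide_eq_false hak]
      rw [hstep]
      exact ih hk'

-- ===== A-side characterisation =====

lemma length_foldl_set {β : Type} (ks : List β) (P : β → Prop) [DecidablePred P]
    (idx : β → Nat) (v : β → Int) (r : List Int) :
    (ks.foldl (fun r k => if P k then r.set (idx k) (v k) else r) r).length = r.length := by
  induction ks generalizing r with
  | nil => rfl
  | cons k ks ih =>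
    simp only [List.foldl_cons]
    split <;> simp [ih]

lemma foldl_set_range_getElem? (P : Nat → Prop) [DecidablePred P] (v : Nat → Int)
    (m : Nat) (r : List Int) (hm : m ≤ r.length) (j : Nat) :
    ((List.range m).foldl (fun r k => if P k then r.set k (v k) else r) r)[j]?
      = if j < m ∧ P j then some (v j) else r[j]? := by
  induction m with
  | zero => simp
  | succ m ih =>
    rw [List.range_succ, List.foldl_append]
    simp only [List.foldl_cons, List.foldl_nil]
    have hm' : m ≤ r.length := Nat.le_of_succ_le hm
    have hlen : ((List.range m).foldl (fun r k => if P k then r.set k (v k) else r) r).length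
        = r.length := length_foldl_set (List.range m) P id v r
    by_cases hP : P m
    · rw [if_pos hP, List.getElem?_set, hlen]
      by_cases hj : m = j
      · subst hj
        rw [if_pos rfl, if_pos (by omega), if_pos ⟨by omega, hP⟩]
      · rw [if_neg hj, ih hm']
        by_cases h1 : j < m ∧ P j
        · rw [if_pos h1, if_pos ⟨by omega, h1.2⟩]
        · rw [if_neg h1, if_neg (by rintro ⟨h2, h3⟩; exact h1 ⟨by omega, h3⟩)]
    · rw [if_neg hP, ih hm']
      by_cases h1 : j < m ∧ P j
      · rw [if_pos h1, if_pos ⟨by omega, h1.2⟩]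
      · rw [if_neg h1, if_neg ?_]
        rintro ⟨h2, h3⟩
        by_cases hjm : j = m
        · subst hjm; exact hP h3
        · exact h1 ⟨by omega, h3⟩

lemma mark_eq (cs : List Char) (l : String) :
    (List.range cs.length).foldl
        (fun r k => if l = String.ofList [cs.getD k ' '] then r.set k 1 else r)
        (List.replicate cs.length (0 : Int))
      = cs.map (fun c => if l = String.ofList [c] then (1 : Int) else 0) := by
  apply List.ext_getElem?
  intro j
  rw [foldl_set_range_getElem? (fun k => l = String.ofList [cs.getD k ' ']) (fun _ => 1)
      cs.length _ (by simp) j]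
  by_cases hj : j < cs.length
  · have hg : cs.getD j ' ' = cs[j] := by
      simp [List.getD, List.getElem?_eq_getElem hj]
    by_cases hP : l = String.ofList [cs[j]]
    · rw [if_pos ⟨hj, by rw [hg]; exact hP⟩]
      simp [List.getElem?_map, List.getElem?_eq_getElem hj, hP]
    · rw [if_neg (by rintro ⟨-, h⟩; rw [hg] at h; exact hP h)]
      simp [hP, hj]
  · rw [if_neg (by rintro ⟨h, -⟩; omega)]
    have h1 : cs.length ≤ j := by omega
    rw [List.getElem?_eq_none (by simpa using h1), List.getElem?_eq_none (by simpa using h1)]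

lemma prefix_fold (v : List Int) (t : Nat) (ht : t < v.length) :
    (List.range t).foldl (fun r k => r.set (k + 1) (r.getD (k + 1) 0 + r.getD k 0)) v
      = (List.range v.length).map
          (fun j => if j ≤ t then (v.take (j + 1)).sum else v.getD j 0) := by
  induction t with
  | zero =>
    apply List.ext_getElem?
    intro j
    simp only [List.range_zero, List.foldl_nil, List.getElem?_map]
    by_cases hj : j < v.length
    · rw [List.getElem?_range hj, List.getElem?_eq_getElem hj]
      simp only [Option.map_some]
      by_cases hj0 : j ≤ 0
      · have : j = 0 := by omega
        subst this
        rw [if_pos le_rfl, List.sum_take_succ v 0 hj]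
        simp
      · rw [if_neg hj0]
        simp [List.getD, List.getElem?_eq_getElem hj]
    · rw [List.getElem?_eq_none (by simpa using (by omega : v.length ≤ j)),
        List.getElem?_eq_none (by simpa using (by omega : v.length ≤ j))]
      simp
  | succ t ih =>
    have ht' : t < v.length := by omega
    rw [List.range_succ, List.foldl_append, ih ht']
    simp only [List.foldl_cons, List.foldl_nil]
    have hgd1 : ((List.range v.length).map
        (fun j => if j ≤ t then (v.take (j + 1)).sum else v.getD j 0)).getD (t + 1) 0
        = v.getD (t + 1) 0 := by
      rw [PySem.List.getD_map_range _ _ _ _ (by omega)]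
      simp
    have hgd2 : ((List.range v.length).map
        (fun j => if j ≤ t then (v.take (j + 1)).sum else v.getD j 0)).getD t 0
        = (v.take (t + 1)).sum := by
      rw [PySem.List.getD_map_range _ _ _ _ (by omega)]
      simp
    rw [hgd1, hgd2]
    apply List.ext_getElem?
    intro j
    rw [List.getElem?_set]
    by_cases hj : j < v.length
    · simp only [List.getElem?_map, List.getElem?_range hj, Option.map_some, List.length_map,
        List.length_range]
      by_cases hje : t + 1 = j
      · subst hje
        rw [if_pos rfl, if_pos hj, if_pos (by omega)]
        rw [List.sum_take_succ v (t + 1) ht, List.getD, List.getElem?_eq_getElem ht,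
          Option.getD_some]
        ring_nf
      · rw [if_neg hje]
        by_cases hjt : j ≤ t
        · rw [if_pos hjt, if_pos (by omega)]
        · rw [if_neg hjt, if_neg (by omega)]
    · rw [if_neg (by omega), List.getElem?_eq_none (by simpa using (by omega : v.length ≤ j)),
        List.getElem?_eq_none (by simpa using (by omega : v.length ≤ j))]

lemma count_table_char (seq : String) : count_table seq = pvTable seq.toList := by
  simp only [count_table]
  rw [foldl_pvUpd (PySem.List.pyRange 0 (seq.toList.length : Int) 1)
      (fun k => String.ofList [PySem.List.pyGetD seq.toList k ' '])
      (fun k row => PySem.List.pySetD row k 1) pvAlpha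
      (fun _ => List.replicate seq.toList.length (0 : Int))]
  rw [foldl_pvUpd pvAlpha (fun letter => letter)
      (fun _ row => (PySem.List.pyRange 1 (seq.toList.length : Int) 1).foldl
        (fun r k => PySem.List.pySetD r k (PySem.List.pyGetD r k 0 + PySem.List.pyGetD r (k - 1) 0)) row)]
  apply List.map_congr_left
  intro l hl
  rw [foldl_hit_once pvAlpha l hl (by decide)]
  -- mark loop: convert pyRange/pySetD/pyGetD to Nat-indexed forms
  rw [PySem.List.pyRange_one, List.foldl_map]
  simp only [zero_add, sub_zero, Int.toNat_natCast, PySem.List.pySetD_natCast,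
    PySem.List.pyGetD_natCast]
  rw [mark_eq]
  -- prefix-sum loop
  rcases Nat.eq_zero_or_pos seq.toList.length with h0 | hpos
  · simp [List.length_eq_zero_iff.mp h0]
  · rw [PySem.List.pyRange_one, List.foldl_map]
    have hcast : ((seq.toList.length : Int) - 1).toNat = seq.toList.length - 1 := by omega
    rw [hcast]
    have hbody : ∀ (r : List Int) (k : Nat),
        PySem.List.pySetD r (1 + (k : Int))
          (PySem.List.pyGetD r (1 + (k : Int)) 0 + PySem.List.pyGetD r (1 + (k : Int) - 1) 0)
        = r.set (k + 1) (r.getD (k + 1) 0 + r.getD k 0) := by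
      intro r k
      have h1 : (1 : Int) + (k : Int) = ((k + 1 : Nat) : Int) := by push_cast; ring
      rw [h1]
      rw [show ((k + 1 : Nat) : Int) - 1 = ((k : Nat) : Int) by push_cast; ring]
      rw [PySem.List.pySetD_natCast, PySem.List.pyGetD_natCast, PySem.List.pyGetD_natCast]
    simp only [hbody]
    rw [prefix_fold _ _ (by rw [List.length_map]; omega)]
    -- turn prefix sums of the 0/1 indicator row into running counts
    apply congrArg
    apply List.ext_getElem?
    intro j
    by_cases hj : j < seq.toList.length
    · simp only [List.getElem?_map, List.length_map, List.getElem?_range, hj, Option.map_some]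
      refine congrArg some ?_
      rw [if_pos (by omega), ← List.map_take,
        show (fun c : Char => if l = String.ofList [c] then (1 : Int) else 0)
            = (fun c : Char => if decide (l = String.ofList [c]) = true then (1 : Int) else 0) from
          by funext c; simp,
        PySem.List.sum_map_ite_one_zero (fun c => decide (l = String.ofList [c]))
          (seq.toList.take (j + 1))]
      rfl
    · rw [List.getElem?_eq_none (by simp only [List.length_map, List.length_range]; omega),
        List.getElem?_eq_none (by simp only [List.length_map, List.length_range]; omega)]

-- ===== B-side characterisation =====

lemma b_fold (cs : List Char) (gT : String → List Int) (gC : String → Int) :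
    cs.foldl pvStep (pvAlpha.map (fun l => (l, gT l)), pvAlpha.map (fun l => (l, gC l)))
      = (pvAlpha.map (fun l =>
            (l, gT l ++ (List.range cs.length).map (fun k => gC l + pvCnt l (cs.take (k + 1))))),
         pvAlpha.map (fun l => (l, gC l + pvCnt l cs))) := by
  induction cs generalizing gT gC with
  | nil => simp [pvCnt]
  | cons c cs ih =>
    simp only [List.foldl_cons, pvStep, pvUpd_map]
    rw [foldl_pvUpd pvAlpha (fun letter => letter)
      (fun letter row => row ++
        [pvLook (pvAlpha.map (fun l => (l, if l = String.ofList [c] then gC l + 1 else gC l))) letter])]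
    rw [ih]
    simp only [Prod.mk.injEq]
    have hcnt : ∀ l : String,
        (if l = String.ofList [c] then gC l + 1 else gC l) = gC l + pvCnt l [c] := by
      intro l
      by_cases h : l = String.ofList [c] <;> simp [pvCnt, h]
    constructor
    · apply List.map_congr_left
      intro l hl
      rw [foldl_hit_once pvAlpha l hl (by decide), pvLook_map pvAlpha _ l hl]
      simp only [Prod.mk.injEq, true_and]
      rw [List.append_assoc]
      apply congrArg (gT l ++ ·)
      simp only [List.length_cons]
      rw [List.range_succ_eq_map, List.map_cons, List.map_map]
      have hhead : gC l + pvCnt l ((c :: cs).take (0 + 1))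
          = if l = String.ofList [c] then gC l + 1 else gC l := by
        by_cases h : l = String.ofList [c] <;> simp [pvCnt, h]
      have htail : (List.range cs.length).map
            ((fun k => gC l + pvCnt l ((c :: cs).take (k + 1))) ∘ Nat.succ)
          = (List.range cs.length).map
            (fun k => (if l = String.ofList [c] then gC l + 1 else gC l) + pvCnt l (cs.take (k + 1))) := by
        apply List.map_congr_left
        intro k _
        simp only [Function.comp_apply, Nat.succ_eq_add_one, List.take_succ_cons, pvCnt,
          List.countP_cons]
        push_cast
        by_cases h : l = String.ofList [c] <;> (simp [h]; try ring)
      rw [htail, hhead]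
      simp
    · apply List.map_congr_left
      intro l _
      rw [hcnt l]
      simp only [Prod.mk.injEq, true_and, pvCnt, List.countP_cons]
      push_cast
      by_cases h : l = String.ofList [c] <;> (simp [h]; try ring)

lemma count_table_alt_char (seq : String) : count_table_alt seq = pvTable seq.toList := by
  unfold count_table_alt
  rw [b_fold seq.toList (fun _ => []) (fun _ => 0)]
  simp [pvTable]

-- ===== VERDICT (by name: the statement is the Claim_ definition above) =====
theorem count_table_spec : Claim_equal_count_table := by
  intro seq _ _
  unfold Spec_count_table
  rw [count_table_char, count_table_alt_char]
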